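-- pv_equiv track=rewrite | github.com/AlexMorson/gsa-ultra-2018 | recreation/code.py | solution
-- ===== SOURCE A (Python) =====
-- def solution(a, b):
--     if a == "": return 0
--
--     b = "".join(c for c in b if c in a)
--
--     i = 0
--     j = 0
--     c = 1
--     while i < len(a):
--         if j >= len(b):
--             j = 0
--             c += 1
--
--         if a[i] == b[j]:
--             i += 1
--         j += 1
--
--     return c
-- ===== SOURCE B (Python) =====
-- from bisect import bisect_left
--
-- def solution(a, b):
--     if a == "":
--         return 0
--     aset = set(a)
--     bf = [c for c in b if c in aset]
--     pos = {ch: [i for i, c in enumerate(bf) if c == ch] for ch in aset}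
--     copies = 1
--     j = 0
--     for ch in a:
--         lst = pos[ch]
--         k = bisect_left(lst, j)
--         if k < len(lst):
--             j = lst[k] + 1
--         else:
--             copies += 1
--             j = lst[0] + 1
--     return copies
-- ===== Notes on version B (the rewrite author's own statement) =====
-- stated objective: alternative
-- what changed: Instead of linearly scanning concatenated copies of the filtered b one character at a time, B precomputes per-character position lists of the filtered b and binary-searches (bisect_left) the next matching position for each character of a, jumping directly to it; intended as faster, but measured only ~1.2x at the largest timing size.
import Mathlib
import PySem

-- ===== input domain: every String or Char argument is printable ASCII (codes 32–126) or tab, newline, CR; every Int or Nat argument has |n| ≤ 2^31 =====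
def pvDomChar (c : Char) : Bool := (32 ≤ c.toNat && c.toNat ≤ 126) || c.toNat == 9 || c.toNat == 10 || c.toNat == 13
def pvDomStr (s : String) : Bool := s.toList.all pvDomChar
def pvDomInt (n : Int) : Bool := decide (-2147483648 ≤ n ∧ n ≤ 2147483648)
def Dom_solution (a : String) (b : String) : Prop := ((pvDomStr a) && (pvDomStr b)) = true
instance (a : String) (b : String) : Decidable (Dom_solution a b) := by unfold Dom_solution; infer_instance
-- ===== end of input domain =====

-- B replaces A's character-by-character scan over repeated copies of the filtered b
-- by per-character position lists plus binary search (bisect_left): objective "alternative".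


-- ===== PORT A =====
-- A's while loop, one recursive call per loop iteration; the fuel argument only
-- makes the recursion total (under Pre_ the loop terminates well within it).
def loopA (al bf : List Char) : Nat → Nat → Nat → Int → Int
  | 0, _, _, c => c
  | fuel+1, i, j, c =>
    if i < al.length then
      let jc : Nat × Int := if bf.length ≤ j then (0, c+1) else (j, c)
      let i' : Nat := if al.getD i '?' = bf.getD jc.1 '?' then i+1 else i
      loopA al bf fuel i' (jc.1+1) jc.2
    else c

def solution (a : String) (b : String) : Int :=
  if a = "" then 0 else
    let al := a.toList
    let bf := b.toList.filter (fun c => al.contains c)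
    loopA al bf (2 * al.length * bf.length + 1) 0 0 1

-- ===== PORT B =====
-- positions of ch in bf, as in Source B's  [i for i, c in enumerate(bf) if c == ch]
def posList (bf : List Char) (ch : Char) : List Int :=
  ((PySem.List.enumerate bf).filter (fun p => p.2 = ch)).map (·.1)

-- the dict comprehension  {ch: [...] for ch in aset}
def posDict (aset : PySem.Set Char) (bf : List Char) : PySem.Dict Char (List Int) :=
  aset.foldl (fun d ch => d.insert ch (posList bf ch)) PySem.Dict.empty

-- loop body of Source B's  for ch in a:  (state = (copies, j))
def stepB (pos : PySem.Dict Char (List Int)) (st : Int × Int) (ch : Char) : Int × Int :=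
  let lst := pos.getD ch []
  let k := PySem.List.bisectLeft lst st.2
  if k < lst.length then (st.1, lst.getD k 0 + 1)
  else (st.1 + 1, lst.getD 0 0 + 1)

def solution_alt (a : String) (b : String) : Int :=
  if a = "" then 0 else
    let al := a.toList
    let aset := PySem.Set.ofList al
    let bf := b.toList.filter (fun c => PySem.Set.contains aset c)
    let pos := posDict aset bf
    (al.foldl (stepB pos) (1, 0)).1

-- ===== PRECONDITION & SPEC =====
-- Pre_ excludes inputs where some character of the nonempty a never occurs in b:
-- there A never returns (it loops forever, or raises IndexError once the filtered b is empty).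
def Pre_solution (a : String) (b : String) : Prop := (a.toList.all (fun c => b.toList.contains c)) = true
instance (a : String) (b : String) : Decidable (Pre_solution a b) := by unfold Pre_solution; infer_instance

def pvWitness_solution : String × String := ("abcab", "cba")

def Spec_solution (a : String) (b : String) (out : Int) : Prop := out = solution_alt a b
instance (a : String) (b : String) (out : Int) : Decidable (Spec_solution a b out) := by unfold Spec_solution; infer_instance

-- ===== CLAIM (what is proved, stated in full; the proofs are below) =====
def Claim_equal_solution : Prop := ∀ (a : String) (b : String), Dom_solution a b → Pre_solution a b → Spec_solution a b (solution a b)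

-- ===== LEMMAS AND PROOFS =====

-- first index p ≥ j with bf[p] = ch (proof-side characterisation of both loops)
def findFrom (bf : List Char) (ch : Char) (j : Nat) : Option Nat :=
  if j < bf.length then
    if bf.getD j '?' = ch then some j else findFrom bf ch (j+1)
  else none
termination_by bf.length - j

-- reference run: one step per character of a, always jumping to the next occurrence
def runSpec (bf : List Char) : List Char → Nat → Int → Int
  | [], _, c => c
  | ch :: rest, j, c =>
    match findFrom bf ch j with
    | some p => runSpec bf rest (p+1) c
    | none =>
      match findFrom bf ch 0 with
      | some p => runSpec bf rest (p+1) (c+1)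
      | none => c + 1

theorem findFrom_some (bf : List Char) (ch : Char) (j p : Nat)
    (h : findFrom bf ch j = some p) :
    j ≤ p ∧ p < bf.length ∧ bf.getD p '?' = ch ∧ ∀ q, j ≤ q → q < p → bf.getD q '?' ≠ ch := by
  induction hn : bf.length - j using Nat.strong_induction_on generalizing j with
  | _ n ih =>
    rw [findFrom] at h
    split at h
    · split at h
      · rename_i h1 h2
        cases h
        exact ⟨le_refl _, h1, h2, fun q hq1 hq2 => absurd (lt_of_le_of_lt hq1 hq2) (lt_irrefl _)⟩
      · rename_i h1 h2
        obtain ⟨a1, a2, a3, a4⟩ := ih (bf.length - (j+1)) (by omega) (j+1) h rfl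
        refine ⟨by omega, a2, a3, fun q hq1 hq2 => ?_⟩
        rcases Nat.eq_or_lt_of_le hq1 with rfl | hlt
        · exact h2
        · exact a4 q hlt hq2
    · exact absurd h (by simp)

theorem findFrom_none (bf : List Char) (ch : Char) (j : Nat)
    (h : findFrom bf ch j = none) :
    ∀ q, j ≤ q → q < bf.length → bf.getD q '?' ≠ ch := by
  induction hn : bf.length - j using Nat.strong_induction_on generalizing j with
  | _ n ih =>
    rw [findFrom] at h
    split at h
    · split at h
      · exact absurd h (by simp)
      · rename_i h1 h2
        intro q hq1 hq2
        rcases Nat.eq_or_lt_of_le hq1 with rfl | hlt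
        · exact h2
        · exact ih (bf.length - (j+1)) (by omega) (j+1) h rfl q hlt hq2
    · intro q hq1 hq2; omega

theorem findFrom_unique (bf : List Char) (ch : Char) (j p : Nat)
    (hjp : j ≤ p) (hp : p < bf.length) (hch : bf.getD p '?' = ch)
    (hmin : ∀ q, j ≤ q → q < p → bf.getD q '?' ≠ ch) :
    findFrom bf ch j = some p := by
  cases hf : findFrom bf ch j with
  | none => exact absurd hch (findFrom_none bf ch j hf p hjp hp)
  | some p' =>
    obtain ⟨a1, a2, a3, a4⟩ := findFrom_some bf ch j p' hf
    congr 1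
    by_contra hne
    rcases Nat.lt_or_ge p' p with hlt | hge
    · exact hmin p' a1 hlt a3
    · exact a4 p hjp (by omega) hch

theorem findFrom_of_mem (bf : List Char) (ch : Char) (h : ch ∈ bf) :
    ∃ p, findFrom bf ch 0 = some p := by
  cases hf : findFrom bf ch 0 with
  | some p => exact ⟨p, rfl⟩
  | none =>
    obtain ⟨k, hk, hbk⟩ := List.mem_iff_getElem.mp h
    exact absurd (by simp [List.getD_eq_getElem?_getD, List.getElem?_eq_getElem hk, hbk])
      (findFrom_none bf ch 0 hf k (Nat.zero_le _) hk)

theorem loopA_scan (al bf : List Char) (i : Nat) (ch : Char)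
    (hi : i < al.length) (hch : al.getD i '?' = ch) :
    ∀ j p, findFrom bf ch j = some p →
    ∀ fuel c, p - j + 1 ≤ fuel →
      loopA al bf fuel i j c = loopA al bf (fuel - (p - j + 1)) (i+1) (p+1) c := by
  intro j p hf
  induction hn : p - j using Nat.strong_induction_on generalizing j with
  | _ n ih =>
    intro fuel c hfuel
    obtain ⟨hjp, hp, hpch, hmin⟩ := findFrom_some bf ch j p hf
    obtain ⟨f, rfl⟩ : ∃ f, fuel = f + 1 := ⟨fuel - 1, by omega⟩
    rw [loopA]
    rw [if_pos hi]
    have hjlt : j < bf.length := by omega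
    simp only [if_neg (by omega : ¬ bf.length ≤ j)]
    by_cases hj : bf.getD j '?' = ch
    · -- match here: p = j
      have hpj : p = j := by
        by_contra hne
        exact hmin j (le_refl _) (by omega) hj
      subst hpj
      rw [if_pos (by rw [hch]; exact hj.symm)]
      congr 1
      omega
    · have hplt : j < p := by
        rcases Nat.eq_or_lt_of_le hjp with rfl | h; · exact absurd hpch hj
        · exact h
      rw [if_neg (by rw [hch]; intro hc; exact hj hc.symm)]
      have hf' : findFrom bf ch (j+1) = some p := by
        rw [findFrom, if_pos hjlt, if_neg hj] at hf; exact hf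
      rw [ih (p - (j+1)) (by omega) (j+1) hf' rfl f c (by omega)]
      congr 1
      omega

theorem loopA_scan_end (al bf : List Char) (i : Nat) (ch : Char)
    (hi : i < al.length) (hch : al.getD i '?' = ch) :
    ∀ j, j ≤ bf.length → findFrom bf ch j = none →
    ∀ fuel c, bf.length - j ≤ fuel →
      loopA al bf fuel i j c = loopA al bf (fuel - (bf.length - j)) i bf.length c := by
  intro j hj hf
  induction hn : bf.length - j using Nat.strong_induction_on generalizing j with
  | _ n ih =>
    intro fuel c hfuel
    rcases Nat.eq_or_lt_of_le hj with rfl | hjlt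
    · congr 1
      omega
    · obtain ⟨f, rfl⟩ : ∃ f, fuel = f + 1 := ⟨fuel - 1, by omega⟩
      rw [loopA, if_pos hi]
      simp only [if_neg (by omega : ¬ bf.length ≤ j)]
      have hne : bf.getD j '?' ≠ ch := by
        intro hc
        rw [findFrom, if_pos hjlt, if_pos hc] at hf
        exact absurd hf (by simp)
      rw [if_neg (by rw [hch]; intro hc; exact hne hc.symm)]
      have hf' : findFrom bf ch (j+1) = none := by
        rw [findFrom, if_pos hjlt, if_neg hne] at hf; exact hf
      rw [ih (bf.length - (j+1)) (by omega) (j+1) (by omega) hf' rfl f c (by omega)]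
      congr 1
      omega

theorem loopA_wrap (al bf : List Char) (i : Nat) (c : Int) (fuel : Nat)
    (hbf : bf ≠ []) (hi : i < al.length) (hfuel : 0 < fuel) :
    loopA al bf fuel i bf.length c = loopA al bf fuel i 0 (c+1) := by
  obtain ⟨f, rfl⟩ : ∃ f, fuel = f + 1 := ⟨fuel - 1, by omega⟩
  have hlen : 0 < bf.length := List.length_pos_iff.mpr hbf
  rw [loopA, loopA, if_pos hi, if_pos hi]
  simp only [if_pos (le_refl bf.length), if_neg (by omega : ¬ bf.length ≤ 0)]

theorem loopA_eq_runSpec (al bf : List Char) :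
    ∀ (rem : List Char) (i j : Nat) (c : Int) (fuel : Nat),
      rem = al.drop i → (∀ ch ∈ rem, ch ∈ bf) → j ≤ bf.length →
      2 * rem.length * bf.length + 1 ≤ fuel →
      loopA al bf fuel i j c = runSpec bf rem j c := by
  intro rem
  induction rem with
  | nil =>
    intro i j c fuel hrem _ _ hfuel
    obtain ⟨f, rfl⟩ : ∃ f, fuel = f + 1 := ⟨fuel - 1, by omega⟩
    have hi : ¬ i < al.length := by
      have := congrArg List.length hrem
      simp [List.length_drop] at this
      omega
    rw [loopA, if_neg hi, runSpec]
  | cons ch rest ih =>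
    intro i j c fuel hrem hmem hj hfuel
    have hi : i < al.length := by
      have := congrArg List.length hrem
      simp [List.length_drop] at this
      omega
    have h2 : al[i]? = some ch := by
      rw [← Nat.add_zero i, ← List.getElem?_drop, ← hrem]; rfl
    have hch : al.getD i '?' = ch := by
      simp [List.getD_eq_getElem?_getD, h2]
    have hrest : rest = al.drop (i+1) := by
      have h4 : (ch :: rest).drop 1 = al.drop (i + 1) := by
        rw [hrem, List.drop_drop]
      exact h4
    have hchbf : ch ∈ bf := hmem ch List.mem_cons_self
    have hlen : 0 < bf.length := List.length_pos_iff.mpr (by rintro rfl; simp at hchbf)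
    have hmem' : ∀ x ∈ rest, x ∈ bf := fun x hx => hmem x (List.mem_cons_of_mem _ hx)
    cases hf : findFrom bf ch j with
    | some p =>
      obtain ⟨hjp, hp, -, -⟩ := findFrom_some bf ch j p hf
      rw [loopA_scan al bf i ch hi hch j p hf fuel c (by have key : 2 * (rest.length + 1) * bf.length = 2 * rest.length * bf.length + 2 * bf.length := (by ring); simp only [List.length_cons] at hfuel; omega)]
      rw [runSpec, hf]
      exact ih (i+1) (p+1) c _ hrest hmem' (by omega)
        (by have key : 2 * (rest.length + 1) * bf.length = 2 * rest.length * bf.length + 2 * bf.length := (by ring); simp only [List.length_cons] at hfuel; omega)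
    | none =>
      obtain ⟨p0, hp0⟩ := findFrom_of_mem bf ch hchbf
      obtain ⟨-, hp0lt, -, -⟩ := findFrom_some bf ch 0 p0 hp0
      have hstep1 := loopA_scan_end al bf i ch hi hch j hj hf fuel c (by have key : 2 * (rest.length + 1) * bf.length = 2 * rest.length * bf.length + 2 * bf.length := (by ring); simp only [List.length_cons] at hfuel; omega)
      rw [hstep1]
      rw [loopA_wrap al bf i c _ (by rintro rfl; simp at hchbf) hi
        (by have key : 2 * (rest.length + 1) * bf.length = 2 * rest.length * bf.length + 2 * bf.length := (by ring); simp only [List.length_cons] at hfuel; omega)]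
      rw [loopA_scan al bf i ch hi hch 0 p0 hp0 _ (c+1)
        (by have key : 2 * (rest.length + 1) * bf.length = 2 * rest.length * bf.length + 2 * bf.length := (by ring); simp only [List.length_cons] at hfuel; omega)]
      rw [runSpec, hf, hp0]
      exact ih (i+1) (p0+1) (c+1) _ hrest hmem' (by omega)
        (by have key : 2 * (rest.length + 1) * bf.length = 2 * rest.length * bf.length + 2 * bf.length := (by ring); simp only [List.length_cons] at hfuel; omega)

theorem posDict_getD (aset : PySem.Set Char) (bf : List Char) (ch : Char)
    (hnd : aset.Nodup) (h : ch ∈ aset) :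
    (posDict aset bf).getD ch [] = posList bf ch := by
  have hitems : (posDict aset bf).items = aset.map (fun c => (c, posList bf c)) := by
    unfold posDict
    rw [PySem.Dict.items_foldl_insert_fresh]
    · simp [show (PySem.Dict.empty : PySem.Dict Char (List Int)).items = [] from rfl]
    · intro x hx; simp [PySem.Dict.contains_empty]
    · simpa using hnd
  have hkeys : (posDict aset bf).keys.Nodup := by
    have hk : (posDict aset bf).keys = aset := by
      rw [show (posDict aset bf).keys = (posDict aset bf).items.map (·.1) from rfl, hitems,
        List.map_map]
      have hcomp : ((·.1) ∘ fun c : Char => (c, posList bf c)) = id := rfl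
      rw [hcomp, List.map_id]
    rw [hk]; exact hnd
  have hget : (posDict aset bf).get? ch = some (posList bf ch) :=
    PySem.Dict.get?_of_mem_items (posDict aset bf)
      (by rw [hitems]; exact List.mem_map.mpr ⟨ch, h, rfl⟩) hkeys
  rw [PySem.Dict.getD_eq_get?_getD, hget]
  rfl

theorem mem_posList (bf : List Char) (ch : Char) (m : Int) :
    m ∈ posList bf ch ↔ ∃ k : Nat, k < bf.length ∧ bf.getD k '?' = ch ∧ m = k := by
  unfold posList
  simp only [List.mem_map, List.mem_filter]
  constructor
  · rintro ⟨⟨mi, x⟩, ⟨hmem, hx⟩, rfl⟩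
    obtain ⟨k, hk, hpk⟩ := (PySem.List.mem_enumerate_iff bf 0 (mi, x)).mp hmem
    obtain ⟨h1, h2⟩ := Prod.ext_iff.mp hpk
    simp only at h1 h2
    refine ⟨k, hk, ?_, by simpa using h1⟩
    simp only [decide_eq_true_eq] at hx
    rw [List.getD_eq_getElem?_getD, List.getElem?_eq_getElem hk]
    simpa [← h2] using hx
  · rintro ⟨k, hk, hbk, rfl⟩
    refine ⟨((k : Int), bf[k]), ⟨?_, ?_⟩, rfl⟩
    · exact (PySem.List.mem_enumerate_iff bf 0 _).mpr ⟨k, hk, by simp⟩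
    · simp only [decide_eq_true_eq]
      rw [← hbk, List.getD_eq_getElem?_getD, List.getElem?_eq_getElem hk]
      rfl

theorem posList_pairwise (bf : List Char) (ch : Char) :
    (posList bf ch).Pairwise (· ≤ ·) := by
  unfold posList
  apply List.Pairwise.map
  · intro a b (hab : a.1 < b.1); exact le_of_lt hab
  · exact List.Pairwise.filter _ (PySem.List.pairwise_lt_enumerate bf 0)

theorem posList_nonneg (bf : List Char) (ch : Char) :
    ∀ m ∈ posList bf ch, 0 ≤ m := by
  intro m hm
  obtain ⟨k, _, _, rfl⟩ := (mem_posList bf ch m).mp hm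
  exact Int.natCast_nonneg k

theorem bisect_posList (bf : List Char) (ch : Char) (j : Nat) :
    (PySem.List.bisectLeft (posList bf ch) (j : Int) < (posList bf ch).length →
      ∃ p, findFrom bf ch j = some p ∧
        (posList bf ch).getD (PySem.List.bisectLeft (posList bf ch) (j : Int)) 0 = (p : Int)) ∧
    ((posList bf ch).length ≤ PySem.List.bisectLeft (posList bf ch) (j : Int) →
      findFrom bf ch j = none) := by
  obtain ⟨hK1, hK2, hK3⟩ := PySem.List.bisectLeft_spec (posList bf ch) (j : Int)
    (posList_pairwise bf ch)
  set pl := posList bf ch with hpl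
  set K := PySem.List.bisectLeft pl (j : Int) with hK
  constructor
  · intro hlt
    have hmem : pl[K] ∈ pl := List.getElem_mem hlt
    obtain ⟨p, hp, hbp, hpe⟩ := (mem_posList bf ch _).mp hmem
    have hjle : (j : Int) ≤ pl[K] := hK3 K hlt (le_refl _)
    have hjp : j ≤ p := by rw [hpe] at hjle; exact_mod_cast hjle
    refine ⟨p, ?_, ?_⟩
    · apply findFrom_unique bf ch j p hjp hp hbp
      intro q hq1 hq2 hbq
      have hq : (q : Int) ∈ pl := (mem_posList bf ch (q : Int)).mpr ⟨q, by omega, hbq, rfl⟩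
      obtain ⟨idx, hidx, hidxe⟩ := List.mem_iff_getElem.mp hq
      rcases Nat.lt_or_ge idx K with hK' | hK'
      · have h5 := hK2 idx hidx hK'
        rw [hidxe] at h5
        omega
      · rcases Nat.eq_or_lt_of_le hK' with rfl | hlt'
        · rw [hidxe] at hpe
          have : (q : Int) = (p : Int) := hpe
          omega
        · have hle := List.pairwise_iff_getElem.mp (posList_pairwise bf ch) K idx hlt hidx hlt'
          have : pl[K] ≤ pl[idx] := hle
          rw [hidxe, hpe] at this
          omega
    · rw [List.getD_eq_getElem?_getD, List.getElem?_eq_getElem hlt, hpe]; rfl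
  · intro hge
    cases hf : findFrom bf ch j with
    | none => rfl
    | some p =>
      exfalso
      obtain ⟨hjp, hp, hbp, -⟩ := findFrom_some bf ch j p hf
      have hq : (p : Int) ∈ pl := (mem_posList bf ch (p : Int)).mpr ⟨p, hp, hbp, rfl⟩
      obtain ⟨idx, hidx, hidxe⟩ := List.mem_iff_getElem.mp hq
      have h5 := hK2 idx hidx (by omega)
      rw [hidxe] at h5
      omega

theorem posList_ne_nil (bf : List Char) (ch : Char) (h : ch ∈ bf) :
    posList bf ch ≠ [] := by
  obtain ⟨k, hk, hbk⟩ := List.mem_iff_getElem.mp h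
  have : (k : Int) ∈ posList bf ch := (mem_posList bf ch k).mpr
    ⟨k, hk, by simp [List.getD_eq_getElem?_getD, List.getElem?_eq_getElem hk, hbk], rfl⟩
  exact List.ne_nil_of_mem this

theorem bisectLeft_zero (bf : List Char) (ch : Char) :
    PySem.List.bisectLeft (posList bf ch) (0 : Int) = 0 := by
  obtain ⟨hK1, hK2, hK3⟩ := PySem.List.bisectLeft_spec (posList bf ch) (0 : Int)
    (posList_pairwise bf ch)
  by_contra hne
  have h0 : 0 < PySem.List.bisectLeft (posList bf ch) (0 : Int) := Nat.pos_of_ne_zero hne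
  have hlen : 0 < (posList bf ch).length := by omega
  have := hK2 0 hlen h0
  exact absurd this (not_lt.mpr (posList_nonneg bf ch _ (List.getElem_mem hlen)))

theorem foldB_eq_runSpec (aset : PySem.Set Char) (bf : List Char) (hnd : aset.Nodup) :
    ∀ (rem : List Char) (j : Nat) (c : Int),
      (∀ ch ∈ rem, ch ∈ aset ∧ ch ∈ bf) →
      (rem.foldl (stepB (posDict aset bf)) (c, (j : Int))).1 = runSpec bf rem j c := by
  intro rem
  induction rem with
  | nil => intro j c _; rfl
  | cons ch rest ih =>
    intro j c hmem
    obtain ⟨hcha, hchb⟩ := hmem ch List.mem_cons_self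
    have hmem' : ∀ x ∈ rest, x ∈ aset ∧ x ∈ bf := fun x hx => hmem x (List.mem_cons_of_mem _ hx)
    rw [List.foldl_cons]
    obtain ⟨hs, hn⟩ := bisect_posList bf ch j
    by_cases hlt : PySem.List.bisectLeft (posList bf ch) (j : Int) < (posList bf ch).length
    · obtain ⟨p, hfp, hgd⟩ := hs hlt
      have hstep : stepB (posDict aset bf) (c, (j : Int)) ch = (c, (p : Int) + 1) := by
        unfold stepB
        simp only [posDict_getD aset bf ch hnd hcha]
        rw [if_pos hlt, hgd]
      rw [hstep, runSpec, hfp]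
      have hih := ih (p+1) c hmem'
      rw [show (((p+1 : Nat)) : Int) = (p : Int) + 1 by push_cast; ring] at hih
      exact hih
    · have hfj : findFrom bf ch j = none := hn (by omega)
      have hne := posList_ne_nil bf ch hchb
      have hlen : 0 < (posList bf ch).length := List.length_pos_iff.mpr hne
      obtain ⟨hs0, -⟩ := bisect_posList bf ch 0
      rw [Nat.cast_zero, bisectLeft_zero bf ch] at hs0
      obtain ⟨p0, hf0, hgd0⟩ := hs0 hlen
      have hstep : stepB (posDict aset bf) (c, (j : Int)) ch = (c + 1, (p0 : Int) + 1) := by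
        unfold stepB
        simp only [posDict_getD aset bf ch hnd hcha]
        rw [if_neg hlt, hgd0]
      rw [hstep, runSpec, hfj, hf0]
      have hih := ih (p0+1) (c+1) hmem'
      rw [show (((p0+1 : Nat)) : Int) = (p0 : Int) + 1 by push_cast; ring] at hih
      exact hih

-- ===== VERDICT (by name: the statement is the Claim_ definition above) =====
theorem solution_spec : Claim_equal_solution := by
  unfold Claim_equal_solution Spec_solution
  intro a b _ hpre0
  have hpre : ∀ c ∈ a.toList, c ∈ b.toList := by
    intro c hc
    have := List.all_eq_true.mp hpre0 c hc
    simpa using this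
  unfold solution solution_alt
  by_cases ha : a = ""
  · simp [ha]
  · rw [if_neg ha, if_neg ha]
    set al := a.toList with hal
    set aset := PySem.Set.ofList al with haset
    set bfA := b.toList.filter (fun c => al.contains c) with hbfA
    set bfB := b.toList.filter (fun c => PySem.Set.contains aset c) with hbfB
    have hbf : bfB = bfA := by
      rw [hbfB, hbfA]
      apply List.filter_congr
      intro x _
      apply Bool.coe_iff_coe.mp
      rw [PySem.Set.contains_iff, haset, PySem.Set.mem_ofList]
      simp
    have hnd : aset.Nodup := PySem.Set.nodup_ofList al
    have hmembA : ∀ ch ∈ al, ch ∈ bfA := fun ch hch =>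
      List.mem_filter.mpr ⟨hpre ch hch, by simpa using hch⟩
    have hmembB : ∀ ch ∈ al, ch ∈ bfB := fun ch hch =>
      List.mem_filter.mpr ⟨hpre ch hch,
        PySem.Set.contains_iff aset ch |>.mpr ((PySem.Set.mem_ofList al ch).mpr hch)⟩
    have hA := loopA_eq_runSpec al bfA al 0 0 1 (2 * al.length * bfA.length + 1)
      (List.drop_zero (l := al)).symm hmembA (Nat.zero_le _) (le_refl _)
    have hB := foldB_eq_runSpec aset bfB hnd al 0 1
      (fun ch hch => ⟨(PySem.Set.mem_ofList al ch).mpr hch, hmembB ch hch⟩)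
    rw [Nat.cast_zero] at hB
    exact hA.trans ((congrArg (fun l => runSpec l al 0 1) hbf.symm).trans hB.symm)
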